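-- pv_equiv track=rewrite | github.com/winston-wen/svarog-algebra | classgroup/src/quadform/check_test_cases.py | find_form
-- ===== SOURCE A (Python) =====
-- def solve_c(a, b):
--     num = b**2 + 599
--     den = 4 * a
--     if num % den != 0:
--         return None
--     else:
--         return num // den
--
-- def find_form(b):
--     assert b % 2 == 1
--     a = 0
--     c = None
--     lim = abs(b) * 10
--     res = []
--     while a < lim:
--         a += 1
--         c = solve_c(a, b)
--         if c != None:
--             res.append((a, b, c))
--     return res
-- ===== SOURCE B (Python) =====
-- def find_form(b):
--     assert b % 2 == 1
--     q = (b * b + 599) // 4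
--     lim = abs(b) * 10
--     small = []
--     large = []
--     i = 1
--     while i * i <= q:
--         if q % i == 0:
--             small.append(i)
--             j = q // i
--             if j != i:
--                 large.append(j)
--         i += 1
--     divisors = small + large[::-1]
--     return [(a, b, q // a) for a in divisors if a <= lim]
-- ===== Notes on version B (the rewrite author's own statement) =====
-- stated objective: faster
-- what changed: B replaces A's scan of all candidates a = 1..10|b| (testing each for divisibility) by trial division up to sqrt(q) of q = (b^2+599)/4, collecting each divisor pair (i, q//i) at once and assembling the ascending result from the small list plus the reversed large list, then filtering by the 10|b| cutoff.
import Mathlib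
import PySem

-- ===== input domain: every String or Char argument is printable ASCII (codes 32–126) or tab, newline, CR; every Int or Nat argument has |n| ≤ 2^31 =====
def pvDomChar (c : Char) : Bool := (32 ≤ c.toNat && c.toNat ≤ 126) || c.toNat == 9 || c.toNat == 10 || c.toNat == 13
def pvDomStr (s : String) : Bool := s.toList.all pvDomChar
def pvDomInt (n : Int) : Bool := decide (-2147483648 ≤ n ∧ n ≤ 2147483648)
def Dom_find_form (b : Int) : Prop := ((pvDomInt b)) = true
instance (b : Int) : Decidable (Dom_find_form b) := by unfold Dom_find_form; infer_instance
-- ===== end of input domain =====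

-- B replaces A's scan over all a = 1..10|b| by trial division of q = (b^2+599)//4 up to sqrt(q),
-- collecting divisor pairs and assembling the ascending result; measured constant-factor speedup.

-- ===== PORT A =====
def solve_c (a b : Int) : Option Int :=
  let num := b ^ 2 + 599
  let den := 4 * a
  if PySem.Int.mod num den ≠ 0 then none
  else some (PySem.Int.floordiv num den)

-- the while-loop of A; `fuel` only makes the recursion structural (enough iterations are supplied)
def find_form_loop (b lim : Int) (fuel : Nat) (a : Int) (res : List (Int × Int × Int)) :
    List (Int × Int × Int) :=
  match fuel with
  | 0 => res
  | Nat.succ n =>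
    if a < lim then
      match solve_c (a + 1) b with
      | some c => find_form_loop b lim n (a + 1) (res ++ [(a + 1, b, c)])
      | none => find_form_loop b lim n (a + 1) res
    else res

def find_form (b : Int) : List (Int × Int × Int) :=
  let lim := |b| * 10
  find_form_loop b lim lim.toNat 0 []

-- ===== PORT B =====
-- the i*i <= q trial-division loop of Source B; `fuel` only makes the recursion structural
def divloop (q : Int) (fuel : Nat) (i : Int) (small large : List Int) : List Int × List Int :=
  match fuel with
  | 0 => (small, large)
  | Nat.succ n =>
    if i * i ≤ q then
      if PySem.Int.mod q i = 0 then
        let j := PySem.Int.floordiv q i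
        if j ≠ i then divloop q n (i + 1) (small ++ [i]) (large ++ [j])
        else divloop q n (i + 1) (small ++ [i]) large
      else divloop q n (i + 1) small large
    else (small, large)

def find_form_alt (b : Int) : List (Int × Int × Int) :=
  let q := PySem.Int.floordiv (b * b + 599) 4
  let lim := |b| * 10
  let p := divloop q (q + 1).toNat 1 [] []
  let divisors := p.1 ++ p.2.reverse
  (divisors.filter (fun a => a ≤ lim)).map (fun a => (a, b, PySem.Int.floordiv q a))

-- ===== PRECONDITION & SPEC =====
-- A asserts b % 2 == 1 (AssertionError on even b), so Pre_ admits exactly the odd integers.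
def Pre_find_form (b : Int) : Prop := PySem.Int.mod b 2 = 1
instance (b : Int) : Decidable (Pre_find_form b) := by unfold Pre_find_form; infer_instance
def pvWitness_find_form : Int := 5

def Spec_find_form (b : Int) (out : List (Int × Int × Int)) : Prop := out = find_form_alt b
instance (b : Int) (out : List (Int × Int × Int)) : Decidable (Spec_find_form b out) := by unfold Spec_find_form; infer_instance

-- ===== CLAIM (what is proved, stated in full; the proofs are below) =====
def Claim_equal_find_form : Prop := ∀ (b : Int), Dom_find_form b → Pre_find_form b → Spec_find_form b (find_form b)

-- ===== LEMMAS AND PROOFS =====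

-- closed form of A's while-loop: a filterMap over the remaining range
theorem loopA_closed (b lim : Int) : ∀ (fuel : Nat) (a : Int) (res : List (Int × Int × Int)),
    (lim - a).toNat ≤ fuel →
    find_form_loop b lim fuel a res =
      res ++ (PySem.List.pyRange (a + 1) (lim + 1) 1).filterMap
        (fun x => (solve_c x b).map (fun c => (x, b, c))) := by
  intro fuel
  induction fuel with
  | zero =>
    intro a res hf
    rw [PySem.List.pyRange_one_eq_nil (by omega : lim + 1 ≤ a + 1)]
    simp [find_form_loop]
  | succ n ih =>
    intro a res hf
    by_cases h : a < lim
    · rw [PySem.List.pyRange_one_cons (by omega : a + 1 < lim + 1)]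
      cases hsc : solve_c (a + 1) b with
      | some c =>
        simp only [find_form_loop, if_pos h, hsc]
        rw [ih (a + 1) _ (by omega)]
        simp [List.filterMap_cons, hsc]
      | none =>
        simp only [find_form_loop, if_pos h, hsc]
        rw [ih (a + 1) _ (by omega)]
        simp [List.filterMap_cons, hsc]
    · rw [PySem.List.pyRange_one_eq_nil (by omega : lim + 1 ≤ a + 1)]
      simp [find_form_loop, h]

theorem solve_c_eq (b q x : Int) (h4 : b ^ 2 + 599 = 4 * q) (hx : 1 ≤ x) :
    solve_c x b = if x ∣ q then some (q / x) else none := by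
  unfold solve_c
  rw [h4]
  have hdvd : PySem.Int.mod (4 * q) (4 * x) = 0 ↔ x ∣ q := by
    rw [PySem.Int.mod_eq_zero_iff_dvd]
    exact mul_dvd_mul_iff_left (by norm_num : (4:Int) ≠ 0)
  by_cases h : x ∣ q
  · simp only [hdvd.mpr h, if_pos h]
    rw [if_neg (by simp), PySem.Int.floordiv_eq_ediv_of_pos (by omega : (0:Int) < 4 * x),
      Int.mul_ediv_mul_of_pos _ _ (by norm_num : (0:Int) < 4)]
  · rw [if_pos (fun hc => h (hdvd.mp hc)), if_neg h]

theorem filterMap_if {β : Type} (P : Int → Prop) [DecidablePred P] (f : Int → β) :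
    ∀ l : List Int, l.filterMap (fun x => if P x then some (f x) else none)
      = (l.filter (fun x => decide (P x))).map f := by
  intro l
  induction l with
  | nil => rfl
  | cons a l ih =>
    by_cases h : P a <;> simp [List.filterMap_cons, List.filter_cons, h, ih]

theorem filterMap_congr' {β : Type} (f g : Int → Option β) :
    ∀ l : List Int, (∀ a ∈ l, f a = g a) → l.filterMap f = l.filterMap g := by
  intro l
  induction l with
  | nil => intro _; rfl
  | cons a l ih =>
    intro h
    simp only [List.filterMap_cons, h a (by simp), ih (fun x hx => h x (by simp [hx]))]

-- what the finished accumulators mean once the loop may stop (q < i*i)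
theorem divloop_base (q i : Int) (s l : List Int) (hq : 0 < q) (hi : 1 ≤ i) (hg : q < i * i)
    (hs : ∀ x, x ∈ s ↔ (1 ≤ x ∧ x < i ∧ x ∣ q ∧ x * x ≤ q))
    (hl : ∀ x, x ∈ l ↔ (∃ e, 1 ≤ e ∧ e < i ∧ e * x = q ∧ q < x * x))
    (hsp : s.Pairwise (· < ·)) (hlp : l.Pairwise (· > ·)) :
    ((∀ d, d ∈ s ↔ (1 ≤ d ∧ d ∣ q ∧ d * d ≤ q)) ∧
     (∀ d, d ∈ l ↔ (1 ≤ d ∧ d ∣ q ∧ q < d * d)) ∧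
     s.Pairwise (· < ·) ∧ l.Pairwise (· > ·)) := by
  refine ⟨?_, ?_, hsp, hlp⟩
  · intro d
    rw [hs]
    constructor
    · rintro ⟨h1, _, h3, h4⟩; exact ⟨h1, h3, h4⟩
    · rintro ⟨h1, h3, h4⟩
      refine ⟨h1, ?_, h3, h4⟩
      by_contra h
      push_neg at h
      nlinarith [mul_le_mul h h (by omega : (0:Int) ≤ i) (by omega : (0:Int) ≤ d)]
  · intro d
    rw [hl]
    constructor
    · rintro ⟨e, h1, _, h3, h4⟩
      refine ⟨by nlinarith, ⟨e, by rw [mul_comm]; exact h3.symm⟩, h4⟩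
    · rintro ⟨h1, ⟨e, he⟩, h4⟩
      have he' : e * d = q := by rw [mul_comm]; exact he.symm
      have he1 : 1 ≤ e := by nlinarith
      have hed : e < d := by nlinarith
      refine ⟨e, he1, ?_, he', h4⟩
      by_contra h
      push_neg at h
      nlinarith [mul_le_mul h h (by omega : (0:Int) ≤ i) (by omega : (0:Int) ≤ e)]

-- the trial-division loop: membership and ordering of both accumulated lists
theorem divloop_spec (q : Int) (hq : 0 < q) : ∀ (fuel : Nat) (i : Int) (s l : List Int),
    (q + 1 - i).toNat ≤ fuel → 1 ≤ i →
    (∀ x, x ∈ s ↔ (1 ≤ x ∧ x < i ∧ x ∣ q ∧ x * x ≤ q)) →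
    (∀ x, x ∈ l ↔ (∃ e, 1 ≤ e ∧ e < i ∧ e * x = q ∧ q < x * x)) →
    s.Pairwise (· < ·) → l.Pairwise (· > ·) →
    ((∀ d, d ∈ (divloop q fuel i s l).1 ↔ (1 ≤ d ∧ d ∣ q ∧ d * d ≤ q)) ∧
     (∀ d, d ∈ (divloop q fuel i s l).2 ↔ (1 ≤ d ∧ d ∣ q ∧ q < d * d)) ∧
     (divloop q fuel i s l).1.Pairwise (· < ·) ∧ (divloop q fuel i s l).2.Pairwise (· > ·)) := by
  intro fuel
  induction fuel with
  | zero =>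
    intro i s l hf hi hs hl hsp hlp
    have hg : q < i * i := by nlinarith [(by omega : q + 1 ≤ i)]
    simpa [divloop] using divloop_base q i s l hq hi hg hs hl hsp hlp
  | succ n ih =>
    intro i s l hf hi hs hl hsp hlp
    by_cases hg : i * i ≤ q
    · have hiq : i ≤ q := by nlinarith
      have hf' : (q + 1 - (i + 1)).toNat ≤ n := by omega
      by_cases hm : PySem.Int.mod q i = 0
      · have hdvd : i ∣ q := (PySem.Int.mod_eq_zero_iff_dvd q i).mp hm
        have hjq : i * PySem.Int.floordiv q i = q := by
          rw [PySem.Int.floordiv_eq_ediv_of_pos (by omega : 0 < i)]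
          exact Int.mul_ediv_cancel' hdvd
        set j := PySem.Int.floordiv q i with hjdef
        by_cases hj : j ≠ i
        · rw [show divloop q (n + 1) i s l = divloop q n (i + 1) (s ++ [i]) (l ++ [j]) by
            simp [divloop, hg, hm, ← hjdef, hj]]
          have hj1 : 1 ≤ j := by nlinarith
          have hij : i < j := by
            rcases lt_or_ge i j with h | h
            · exact h
            · exact absurd (le_antisymm (by nlinarith) h).symm hj
          have hqjj : q < j * j := by nlinarith
          refine ih (i + 1) (s ++ [i]) (l ++ [j]) hf' (by omega) ?_ ?_ ?_ ?_
          · intro x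
            simp only [List.mem_append, List.mem_singleton, hs]
            constructor
            · rintro (⟨h1, h2, h3, h4⟩ | rfl)
              · exact ⟨h1, by omega, h3, h4⟩
              · exact ⟨hi, by omega, hdvd, hg⟩
            · rintro ⟨h1, h2, h3, h4⟩
              rcases lt_or_ge x i with h | h
              · exact Or.inl ⟨h1, h, h3, h4⟩
              · exact Or.inr (by omega)
          · intro x
            simp only [List.mem_append, List.mem_singleton, hl]
            constructor
            · rintro (⟨e, h1, h2, h3, h4⟩ | rfl)
              · exact ⟨e, h1, by omega, h3, h4⟩
              · exact ⟨i, hi, by omega, hjq, hqjj⟩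
            · rintro ⟨e, h1, h2, h3, h4⟩
              rcases lt_or_ge e i with h | h
              · exact Or.inl ⟨e, h1, h, h3, h4⟩
              · have hei : e = i := by omega
                subst hei
                exact Or.inr (mul_left_cancel₀ (by omega : e ≠ 0) (hjq.trans h3.symm) |>.symm)
          · rw [List.pairwise_append]
            exact ⟨hsp, List.pairwise_singleton _ _,
              fun x hx y hy => by rw [List.mem_singleton] at hy; subst hy; exact (hs x |>.mp hx).2.1⟩
          · rw [List.pairwise_append]
            refine ⟨hlp, List.pairwise_singleton _ _, fun x hx y hy => ?_⟩
            rw [List.mem_singleton] at hy; subst hy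
            obtain ⟨e, h1, h2, h3, h4⟩ := (hl x).mp hx
            have hx1 : 1 ≤ x := by nlinarith
            show j < x
            nlinarith [mul_pos (show (0:Int) < i - e by omega) (show (0:Int) < j by omega)]
        · rw [show divloop q (n + 1) i s l = divloop q n (i + 1) (s ++ [i]) l by
            simp [divloop, hg, hm, ← hjdef, hj]]
          have hji : j = i := by omega
          have hqii : q = i * i := by rw [← hjq, hji]
          refine ih (i + 1) (s ++ [i]) l hf' (by omega) ?_ ?_ ?_ hlp
          · intro x
            simp only [List.mem_append, List.mem_singleton, hs]
            constructor
            · rintro (⟨h1, h2, h3, h4⟩ | rfl)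
              · exact ⟨h1, by omega, h3, h4⟩
              · exact ⟨hi, by omega, hdvd, hg⟩
            · rintro ⟨h1, h2, h3, h4⟩
              rcases lt_or_ge x i with h | h
              · exact Or.inl ⟨h1, h, h3, h4⟩
              · exact Or.inr (by omega)
          · intro x
            rw [hl]
            constructor
            · rintro ⟨e, h1, h2, h3, h4⟩
              exact ⟨e, h1, by omega, h3, h4⟩
            · rintro ⟨e, h1, h2, h3, h4⟩
              refine ⟨e, h1, ?_, h3, h4⟩
              rcases lt_or_ge e i with h | h
              · exact h
              · exfalso
                have hei : e = i := by omega
                rw [hei] at h3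
                have hxi : x = i := mul_left_cancel₀ (by omega : i ≠ 0) (h3.trans hqii)
                rw [hxi, ← hqii] at h4
                exact lt_irrefl q h4
          · rw [List.pairwise_append]
            exact ⟨hsp, List.pairwise_singleton _ _,
              fun x hx y hy => by rw [List.mem_singleton] at hy; subst hy; exact (hs x |>.mp hx).2.1⟩
      · rw [show divloop q (n + 1) i s l = divloop q n (i + 1) s l by
          simp [divloop, hg, hm]]
        have hnd : ¬ i ∣ q := fun h => hm ((PySem.Int.mod_eq_zero_iff_dvd q i).mpr h)
        refine ih (i + 1) s l hf' (by omega) ?_ ?_ hsp hlp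
        · intro x
          rw [hs]
          constructor
          · rintro ⟨h1, h2, h3, h4⟩; exact ⟨h1, by omega, h3, h4⟩
          · rintro ⟨h1, h2, h3, h4⟩
            refine ⟨h1, ?_, h3, h4⟩
            by_contra hlt
            have hxi : x = i := by omega
            exact hnd (hxi ▸ h3)
        · intro x
          rw [hl]
          constructor
          · rintro ⟨e, h1, h2, h3, h4⟩; exact ⟨e, h1, by omega, h3, h4⟩
          · rintro ⟨e, h1, h2, h3, h4⟩
            refine ⟨e, h1, ?_, h3, h4⟩
            by_contra hlt
            have hei : e = i := by omega
            exact hnd (hei ▸ ⟨x, h3.symm⟩)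
    · rw [show divloop q (n + 1) i s l = (s, l) by simp [divloop, hg]]
      exact divloop_base q i s l hq hi (by omega) hs hl hsp hlp

theorem eq_of_pairwise_lt_of_mem {l1 l2 : List Int}
    (h1 : l1.Pairwise (· < ·)) (h2 : l2.Pairwise (· < ·)) (hm : ∀ x, x ∈ l1 ↔ x ∈ l2) :
    l1 = l2 := by
  have p : l1.Perm l2 :=
    (List.perm_ext_iff_of_nodup (h1.imp ne_of_lt) (h2.imp ne_of_lt)).mpr hm
  exact p.eq_of_pairwise (fun a b _ _ ha hb => le_antisymm ha hb)
    (h1.imp le_of_lt) (h2.imp le_of_lt)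

-- ===== VERDICT (by name: the statement is the Claim_ definition above) =====
theorem find_form_spec : Claim_equal_find_form := by
  intro b _ hpre
  unfold Spec_find_form
  -- b is odd: b = 2k+1
  have hb2 : b % 2 = 1 := by
    rw [← PySem.Int.mod_eq_emod_of_pos (by norm_num : (0:Int) < 2)]; exact hpre
  obtain ⟨k, rfl⟩ : ∃ k, b = 2 * k + 1 := ⟨b / 2, by omega⟩
  set b := 2 * k + 1 with hbdef
  set q0 : Int := k * k + k + 150 with hq0def
  have h4 : b * b + 599 = 4 * q0 := by rw [hbdef, hq0def]; ring
  have h4p : b ^ 2 + 599 = 4 * q0 := by rw [sq]; exact h4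
  have hq0 : 0 < q0 := by nlinarith [mul_self_nonneg (2 * k + 1)]
  set lim : Int := |b| * 10 with hlimdef
  -- the common canonical list of admitted divisors of q0
  set F : List Int := (PySem.List.pyRange 1 (lim + 1) 1).filter (fun x => decide (x ∣ q0)) with hF
  -- A's side
  have hA : find_form b = F.map (fun x => (x, b, q0 / x)) := by
    unfold find_form
    rw [loopA_closed b lim lim.toNat 0 [] (by omega), List.nil_append, zero_add,
      filterMap_congr' _ (fun x => if x ∣ q0 then some ((x, b, q0 / x)) else none)
        _ (fun a ha => by
          rw [solve_c_eq b q0 a h4p (PySem.List.mem_pyRange_one.mp ha).1]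
          by_cases h : a ∣ q0 <;> simp [h]),
      filterMap_if]
  -- B's side
  have hB : find_form_alt b = ((((divloop q0 (q0 + 1).toNat 1 [] []).1 ++ (divloop q0 (q0 + 1).toNat 1 [] []).2.reverse).filter
      (fun a => decide (a ≤ lim))).map (fun a => (a, b, PySem.Int.floordiv q0 a))) := by
    unfold find_form_alt
    have hq : PySem.Int.floordiv (b * b + 599) 4 = q0 := by
      rw [h4, PySem.Int.floordiv_eq_ediv_of_pos (by norm_num : (0:Int) < 4),
        Int.mul_ediv_cancel_left _ (by norm_num : (4:Int) ≠ 0)]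
    simp only [hq]
    rw [← hlimdef]
  rw [hA, hB]
  -- characterise the divisor list
  obtain ⟨hmS, hmL, hpS, hpL⟩ := divloop_spec q0 hq0 (q0 + 1).toNat 1 [] [] (by omega) le_rfl
    (by intro x; simp; omega) (by intro x; simp; omega)
    (List.Pairwise.nil) (List.Pairwise.nil)
  set D : List Int := (divloop q0 (q0 + 1).toNat 1 [] []).1 ++ (divloop q0 (q0 + 1).toNat 1 [] []).2.reverse with hD
  have hmD : ∀ d, d ∈ D ↔ (1 ≤ d ∧ d ∣ q0) := by
    intro d
    rw [hD, List.mem_append, List.mem_reverse, hmS, hmL]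
    constructor
    · rintro (⟨h1, h2, _⟩ | ⟨h1, h2, _⟩) <;> exact ⟨h1, h2⟩
    · rintro ⟨h1, h2⟩
      rcases lt_or_ge q0 (d * d) with h | h
      · exact Or.inr ⟨h1, h2, h⟩
      · exact Or.inl ⟨h1, h2, h⟩
  have hpD : D.Pairwise (· < ·) := by
    rw [hD, List.pairwise_append]
    refine ⟨hpS, List.pairwise_reverse.mpr hpL, fun x hx y hy => ?_⟩
    rw [List.mem_reverse] at hy
    obtain ⟨hx1, _, hx2⟩ := hmS x |>.mp hx
    obtain ⟨hy1, _, hy2⟩ := hmL y |>.mp hy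
    by_contra h
    push_neg at h
    nlinarith [mul_le_mul h h (by omega : (0:Int) ≤ y) (by omega : (0:Int) ≤ x)]
  -- the two filtered lists coincide
  have hFE : F = D.filter (fun a => decide (a ≤ lim)) := by
    apply eq_of_pairwise_lt_of_mem
    · exact (PySem.List.pairwise_lt_pyRange_one 1 (lim + 1)).filter _
    · exact hpD.filter _
    · intro x
      simp only [hF, List.mem_filter, PySem.List.mem_pyRange_one, hmD x, decide_eq_true_eq]
      constructor
      · rintro ⟨⟨h1, h2⟩, h3⟩; exact ⟨⟨h1, h3⟩, by omega⟩
      · rintro ⟨⟨h1, h3⟩, h2⟩; exact ⟨⟨h1, by omega⟩, h3⟩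
  rw [← hFE]
  apply List.map_congr_left
  intro x hx
  have hx1 : 1 ≤ x := by
    rw [hF, List.mem_filter] at hx
    exact (PySem.List.mem_pyRange_one.mp hx.1).1
  rw [PySem.Int.floordiv_eq_ediv_of_pos (by omega : 0 < x)]
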